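-- pv_equiv track=rewrite | github.com/drhannahsc-arch/MABE | nist_backsolve_v2.py | deduplicate_donors
-- ===== SOURCE A (Python) =====
-- from collections import defaultdict, Counter
--
-- _PAIRED_DONORS = {"O_carboxylate": 2, "O_phosphoryl": 2, "O_sulfonate": 3}
--
-- def deduplicate_donors(ds):
--     counts = Counter(ds)
--     out = []
--     for s in ds:
--         if s in _PAIRED_DONORS:
--             if sum(1 for d in out if d == s) < max(1, counts[s] // _PAIRED_DONORS[s]):
--                 out.append(s)
--         else:
--             out.append(s)
--     return out
-- ===== SOURCE B (Python) =====
-- from collections import defaultdict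
--
-- _PAIRED_DONORS = {"O_carboxylate": 2, "O_phosphoryl": 2, "O_sulfonate": 3}
--
-- def deduplicate_donors(ds):
--     idx = defaultdict(list)
--     for i, s in enumerate(ds):
--         idx[s].append(i)
--     keep = set()
--     for s, ixs in idx.items():
--         if s in _PAIRED_DONORS:
--             cap = max(1, len(ixs) // _PAIRED_DONORS[s])
--             keep.update(ixs[:cap])
--         else:
--             keep.update(ixs)
--     return [ds[i] for i in sorted(keep)]
-- ===== Notes on version B (the rewrite author's own statement) =====
-- stated objective: alternative
-- what changed: B is staged instead of A's single budget-checked output pass: it first groups all occurrence indices per donor into an index table (defaultdict(list) over enumerate), then builds a keep-set of indices (first cap indices of each paired type, all indices of others), and finally reconstructs the output as [ds[i] for i in sorted(keep)]; A's per-element rescan of the growing output list disappears, but on random inputs this is not measurably faster.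
import Mathlib
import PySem

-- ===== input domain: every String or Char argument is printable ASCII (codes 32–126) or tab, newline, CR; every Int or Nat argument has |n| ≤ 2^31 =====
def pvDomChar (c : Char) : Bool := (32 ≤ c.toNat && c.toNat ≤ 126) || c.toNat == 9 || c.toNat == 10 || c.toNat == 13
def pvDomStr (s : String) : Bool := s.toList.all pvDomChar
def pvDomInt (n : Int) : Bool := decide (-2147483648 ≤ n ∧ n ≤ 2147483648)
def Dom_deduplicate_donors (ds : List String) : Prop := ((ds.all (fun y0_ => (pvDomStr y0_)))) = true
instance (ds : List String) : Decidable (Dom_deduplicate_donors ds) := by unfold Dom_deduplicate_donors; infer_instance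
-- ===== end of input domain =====

-- B is staged instead of A's single budget-checked pass: it groups all occurrence indices per
-- donor into an index table, builds a keep-set of indices, and reconstructs from sorted(keep);
-- same return value ('alternative', not claimed faster).

-- module constant _PAIRED_DONORS
def pvPaired : PySem.Dict String Int :=
  PySem.Dict.ofList [("O_carboxylate", 2), ("O_phosphoryl", 2), ("O_sulfonate", 3)]

-- ===== PORT A =====
def deduplicate_donors (ds : List String) : List String :=
  let counts := PySem.Dict.counter ds
  ds.foldl (fun out s =>
    match pvPaired.get? s with          -- `if s in _PAIRED_DONORS` + lookup `_PAIRED_DONORS[s]`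
    | some p =>
        -- `sum(1 for d in out if d == s)` ported as the 0/1 sum over out
        if (out.map (fun d => if d == s then (1 : Int) else 0)).sum
             < max 1 (PySem.Int.floordiv (counts.getD s 0) p)
        then out ++ [s] else out
    | none => out ++ [s]) []

-- ===== PORT B =====
def deduplicate_donors_alt (ds : List String) : List String :=
  -- `idx = defaultdict(list); for i, s in enumerate(ds): idx[s].append(i)`
  let idx : PySem.Dict String (List Int) :=
    (PySem.List.enumerate ds).foldl (fun d p => d.modify p.2 [] (· ++ [p.1])) PySem.Dict.empty
  -- `keep = set(); for s, ixs in idx.items(): …`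
  let keep : PySem.Set Int :=
    idx.items.foldl (fun K sp =>
      match pvPaired.get? sp.1 with
      | some p => PySem.Set.update K
          (PySem.List.slice sp.2 none (some (max 1 (PySem.Int.floordiv (PySem.List.len sp.2) p))))
      | none => PySem.Set.update K sp.2) PySem.Set.empty
  -- `[ds[i] for i in sorted(keep)]`; every i ∈ keep is a valid index of ds, so `ds[i]` is exact as pyGetD
  (PySem.List.sorted keep (fun i => i) false).map (fun i => PySem.List.pyGetD ds i "")

-- ===== PRECONDITION & SPEC =====
def Spec_deduplicate_donors (ds : List String) (out : List String) : Prop := out = deduplicate_donors_alt ds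
instance (ds : List String) (out : List String) : Decidable (Spec_deduplicate_donors ds out) := by unfold Spec_deduplicate_donors; infer_instance

-- ===== CLAIM (what is proved, stated in full; the proofs are below) =====
def Claim_equal_deduplicate_donors : Prop := ∀ (ds : List String), Dom_deduplicate_donors ds → Spec_deduplicate_donors ds (deduplicate_donors ds)

-- ===== LEMMAS AND PROOFS =====

def pvG (ds : List String) (i : Int) : String := PySem.List.pyGetD ds i ""
def pvCap (ds : List String) (s : String) (p : Int) : Int :=
  max 1 (PySem.Int.floordiv ((ds.count s : Int)) p)
def pvCond (ds : List String) (i : Int) : Bool :=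
  match pvPaired.get? (pvG ds i) with
  | none => true
  | some p =>
      decide ((((PySem.List.pyRange 0 i 1).countP (fun j => pvG ds j == pvG ds i) : Int))
               < pvCap ds (pvG ds i) p)

theorem pv_countKept (ds : List String) (s : String) (p : Int) (hp : pvPaired.get? s = some p) (k : Nat) :
    ((((PySem.List.pyRange 0 (k:Int) 1).filter (pvCond ds)).countP (fun i => pvG ds i == s) : Int))
      = min (((PySem.List.pyRange 0 (k:Int) 1).countP (fun j => pvG ds j == s) : Int)) (pvCap ds s p) := by
  have hcap : 1 ≤ pvCap ds s p := le_max_left _ _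
  induction k with
  | zero => simp [PySem.List.pyRange]; omega
  | succ k ih =>
    have hsplit : PySem.List.pyRange 0 ((k+1 : Nat) : Int) 1
        = PySem.List.pyRange 0 (k : Int) 1 ++ [(k : Int)] := by
      push_cast
      exact PySem.List.pyRange_one_succ_right (by exact_mod_cast Nat.zero_le k)
    rw [hsplit, List.filter_append, List.countP_append, List.countP_append]
    by_cases hgk : pvG ds (k : Int) = s
    · have hcond : pvCond ds (k : Int)
          = decide ((((PySem.List.pyRange 0 (k:Int) 1).countP (fun j => pvG ds j == s) : Int)) < pvCap ds s p) := by
        simp only [pvCond, hgk, hp]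
      by_cases hlt : (((PySem.List.pyRange 0 (k:Int) 1).countP (fun j => pvG ds j == s) : Int)) < pvCap ds s p
      · have : pvCond ds (k : Int) = true := by rw [hcond]; simpa using hlt
        simp only [List.filter_singleton, this]
        simp [hgk]
        omega
      · have : pvCond ds (k : Int) = false := by rw [hcond]; simpa using hlt
        simp only [List.filter_singleton, this]
        simp [hgk]
        omega
    · have h1 : ([(k:Int)].filter (pvCond ds)).countP (fun i => pvG ds i == s) = 0 := by
        by_cases hc : pvCond ds (k : Int) <;> simp [hc, hgk]
      have h2 : ([(k:Int)]).countP (fun j => pvG ds j == s) = 0 := by simp [hgk]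
      rw [h1, h2]; omega

theorem pvG_natCast (ds : List String) (k : Nat) (h : k < ds.length) : pvG ds (k : Int) = ds[k] := by
  simp [pvG, h]

theorem pv_ds_eq_map (ds : List String) :
    ds = (PySem.List.pyRange 0 (ds.length : Int) 1).map (pvG ds) := by
  rw [PySem.List.pyRange_one]
  simp
  apply List.ext_getElem
  · simp
  · intro i h1 h2; simp [pvG_natCast ds i h1]

theorem pv_A_fold (ds : List String) (k : Nat) :
    (PySem.List.pyRange 0 (k:Int) 1).foldl (fun out i =>
      match pvPaired.get? (pvG ds i) with
      | some p => if (out.map (fun d => if d == pvG ds i then (1:Int) else 0)).sum < pvCap ds (pvG ds i) p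
                  then out ++ [pvG ds i] else out
      | none => out ++ [pvG ds i]) []
    = ((PySem.List.pyRange 0 (k:Int) 1).filter (pvCond ds)).map (pvG ds) := by
  induction k with
  | zero => simp [PySem.List.pyRange]
  | succ k ih =>
    have hsplit : PySem.List.pyRange 0 ((k+1 : Nat) : Int) 1
        = PySem.List.pyRange 0 (k : Int) 1 ++ [(k : Int)] := by
      push_cast
      exact PySem.List.pyRange_one_succ_right (by exact_mod_cast Nat.zero_le k)
    rw [hsplit, List.foldl_append, List.filter_append, List.map_append, ih]
    cases hp : pvPaired.get? (pvG ds (k : Int)) with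
    | none =>
      have hc : pvCond ds (k : Int) = true := by simp [pvCond, hp]
      simp [hp, hc]
    | some p =>
      have hsum : ((((PySem.List.pyRange 0 (k:Int) 1).filter (pvCond ds)).map (pvG ds)).map
            (fun d => if d == pvG ds (k:Int) then (1:Int) else 0)).sum
          = ((((PySem.List.pyRange 0 (k:Int) 1).filter (pvCond ds)).countP (fun i => pvG ds i == pvG ds (k:Int)) : Int)) := by
        rw [PySem.List.sum_map_ite_one_zero]
        rw [List.countP_map]
        rfl
      have hck := pv_countKept ds (pvG ds (k:Int)) p hp k
      have hcond : pvCond ds (k : Int)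
          = decide ((((PySem.List.pyRange 0 (k:Int) 1).countP (fun j => pvG ds j == pvG ds (k:Int)) : Int)) < pvCap ds (pvG ds (k:Int)) p) := by
        simp only [pvCond, hp]
      by_cases hlt : (((PySem.List.pyRange 0 (k:Int) 1).countP (fun j => pvG ds j == pvG ds (k:Int)) : Int)) < pvCap ds (pvG ds (k:Int)) p
      · have hct : pvCond ds (k : Int) = true := by rw [hcond]; simpa using hlt
        simp only [List.foldl_cons, List.foldl_nil, hp, hsum, hck]
        have : min (((PySem.List.pyRange 0 (k:Int) 1).countP (fun j => pvG ds j == pvG ds (k:Int)) : Int)) (pvCap ds (pvG ds (k:Int)) p) < pvCap ds (pvG ds (k:Int)) p := by omega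
        rw [if_pos this]
        simp [hct]
      · have hct : pvCond ds (k : Int) = false := by rw [hcond]; simpa using hlt
        simp only [List.foldl_cons, List.foldl_nil, hp, hsum, hck]
        have : ¬ (min (((PySem.List.pyRange 0 (k:Int) 1).countP (fun j => pvG ds j == pvG ds (k:Int)) : Int)) (pvCap ds (pvG ds (k:Int)) p) < pvCap ds (pvG ds (k:Int)) p) := by
          have hcap : 1 ≤ pvCap ds (pvG ds (k:Int)) p := le_max_left _ _
          omega
        rw [if_neg this]
        simp [hct]

theorem pv_A_char (ds : List String) :
    deduplicate_donors ds
      = ((PySem.List.pyRange 0 (ds.length : Int) 1).filter (pvCond ds)).map (pvG ds) := by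
  have h0 : deduplicate_donors ds
      = ((PySem.List.pyRange 0 (ds.length : Int) 1).map (pvG ds)).foldl (fun out s =>
          match pvPaired.get? s with
          | some p =>
              if (out.map (fun d => if d == s then (1 : Int) else 0)).sum
                   < max 1 (PySem.Int.floordiv ((PySem.Dict.counter ds).getD s 0) p)
              then out ++ [s] else out
          | none => out ++ [s]) [] := by
    rw [deduplicate_donors]
    rw [← pv_ds_eq_map]
  rw [h0, List.foldl_map]
  have h1 := pv_A_fold ds ds.length
  simp only [PySem.Dict.getD_counter, pvCap] at h1 ⊢
  exact h1

def pvIdx (ds : List String) (s : String) : List Int :=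
  (PySem.List.pyRange 0 (ds.length : Int) 1).filter (fun j => pvG ds j == s)

theorem pv_idx_getD (ds : List String) (s : String) :
    ((PySem.List.enumerate ds).foldl (fun d p => d.modify p.2 [] (· ++ [p.1])) PySem.Dict.empty).getD s []
      = pvIdx ds s := by
  rw [show (PySem.List.enumerate ds).foldl (fun d p => d.modify p.2 [] (· ++ [p.1])) PySem.Dict.empty
      = ((PySem.List.enumerate ds).map (fun p => (p.2, p.1))).foldl
          (fun d q => d.modify q.1 [] (· ++ [q.2])) PySem.Dict.empty from by
    rw [List.foldl_map]]
  rw [PySem.Dict.getD_foldl_modify_append]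
  rw [PySem.List.enumerate_eq_map_pyRange ds ""]
  simp only [List.filter_map, List.map_map]
  simp [Function.comp_def, pvIdx, pvG]

theorem pv_idx_keys (ds : List String) :
    ((PySem.List.enumerate ds).foldl (fun d p => d.modify p.2 [] (· ++ [p.1])) PySem.Dict.empty).keys
      = PySem.Set.ofList ds := by
  rw [PySem.Dict.keys_foldl_modify_key (PySem.List.enumerate ds) (fun p => p.2) []
    (fun _ p => (· ++ [p.1])) PySem.Dict.empty]
  rw [PySem.List.map_snd_enumerate]
  simp [PySem.Dict.keys_empty, PySem.Set.update_nil_left]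

theorem pv_idx_keys_nodup (ds : List String) :
    ((PySem.List.enumerate ds).foldl (fun d p => d.modify p.2 [] (· ++ [p.1])) PySem.Dict.empty).keys.Nodup := by
  apply PySem.Dict.nodup_keys_foldl_modify_key
  simp [PySem.Dict.keys_empty]

theorem pv_idx_items (ds : List String) :
    ((PySem.List.enumerate ds).foldl (fun d p => d.modify p.2 [] (· ++ [p.1])) PySem.Dict.empty).items
      = (PySem.Set.ofList ds).map (fun s => (s, pvIdx ds s)) := by
  rw [PySem.Dict.items_eq_map_keys _ (pv_idx_keys_nodup ds) []]
  rw [pv_idx_keys]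
  exact List.map_congr_left (fun s _ => by rw [pv_idx_getD])

def pvChunk (sp : String × List Int) : List Int :=
  match pvPaired.get? sp.1 with
  | some p => PySem.List.slice sp.2 none (some (max 1 (PySem.Int.floordiv (PySem.List.len sp.2) p)))
  | none => sp.2

def pvKeep (ds : List String) : PySem.Set Int :=
  ((PySem.Set.ofList ds).map (fun s => (s, pvIdx ds s))).foldl
    (fun K sp => PySem.Set.update K (pvChunk sp)) PySem.Set.empty

theorem pv_mem_foldl_update {α β : Type} [BEq α] [LawfulBEq α] (l : List β) (h : β → List α)
    (K : PySem.Set α) (y : α) :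
    (y ∈ l.foldl (fun K x => PySem.Set.update K (h x)) K) ↔ y ∈ K ∨ ∃ x ∈ l, y ∈ h x := by
  induction l generalizing K with
  | nil => simp
  | cons b l ih =>
    rw [List.foldl_cons, ih]
    rw [PySem.Set.mem_update]
    constructor
    · rintro ((h1 | h1) | ⟨x, hx, hy⟩)
      · exact Or.inl h1
      · exact Or.inr ⟨b, by simp, h1⟩
      · exact Or.inr ⟨x, by simp [hx], hy⟩
    · rintro (h1 | ⟨x, hx, hy⟩)
      · exact Or.inl (Or.inl h1)
      · rcases List.mem_cons.mp hx with rfl | hx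
        · exact Or.inl (Or.inr hy)
        · exact Or.inr ⟨x, hx, hy⟩

theorem pv_nodup_foldl_update {α β : Type} [BEq α] [LawfulBEq α] (l : List β) (h : β → List α)
    (K : PySem.Set α) (hK : K.Nodup) :
    (l.foldl (fun K x => PySem.Set.update K (h x)) K).Nodup := by
  induction l generalizing K with
  | nil => exact hK
  | cons b l ih => exact ih _ (PySem.Set.nodup_update _ _ hK)

theorem pv_idx_pairwise (ds : List String) (s : String) : (pvIdx ds s).Pairwise (· < ·) :=
  (PySem.List.pairwise_lt_pyRange_one 0 (ds.length : Int)).filter _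

theorem pv_idx_length (ds : List String) (s : String) : (pvIdx ds s).length = ds.count s := by
  conv_rhs => rw [pv_ds_eq_map ds]
  rw [pvIdx, List.count, List.countP_map, ← List.countP_eq_length_filter]
  rfl

theorem pv_mem_take_of_pairwise_lt (L : List Int) (hL : L.Pairwise (· < ·)) (c : Nat) (i : Int) :
    i ∈ L.take c ↔ i ∈ L ∧ L.countP (fun j => decide (j < i)) < c := by
  induction L generalizing c with
  | nil => simp
  | cons x L ih =>
    have hx : ∀ j ∈ L, x < j := (List.pairwise_cons.mp hL).1
    cases c with
    | zero => simp
    | succ c =>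
      rw [List.take_succ_cons]
      by_cases hix : i = x
      · subst hix
        have h0 : L.countP (fun j => decide (j < i)) = 0 :=
          List.countP_eq_zero.mpr (fun j hj => by simpa using not_lt.mpr (le_of_lt (hx j hj)))
        simp [h0]
      · rw [List.mem_cons, List.mem_cons]
        have hni : ¬ i = x := hix
        simp only [hni, false_or]
        rw [ih ((List.pairwise_cons.mp hL).2) c]
        constructor
        · rintro ⟨hiL, hcnt⟩
          have hxi : x < i := hx i hiL
          rw [List.countP_cons]
          simp [hxi]
          exact ⟨hiL, by omega⟩
        · rintro ⟨hiL, hcnt⟩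
          have hxi : x < i := hx i hiL
          rw [List.countP_cons] at hcnt
          simp [hxi] at hcnt
          exact ⟨hiL, by omega⟩

theorem pv_idx_countP_lt (ds : List String) (s : String) (i : Int) (h0 : 0 ≤ i) (hn : i ≤ (ds.length : Int)) :
    (pvIdx ds s).countP (fun j => decide (j < i))
      = (PySem.List.pyRange 0 i 1).countP (fun j => pvG ds j == s) := by
  rw [pvIdx, PySem.List.pyRange_one_append 0 i (ds.length : Int) h0 hn, List.filter_append,
    List.countP_append]
  have h1 : ((PySem.List.pyRange 0 i 1).filter (fun j => pvG ds j == s)).countP (fun j => decide (j < i))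
      = (PySem.List.pyRange 0 i 1).countP (fun j => pvG ds j == s) := by
    rw [List.countP_eq_length.mpr, ← List.countP_eq_length_filter]
    intro j hj
    have := (PySem.List.mem_pyRange_one).mp (List.mem_filter.mp hj).1
    simpa using this.2
  have h2 : ((PySem.List.pyRange i (ds.length : Int) 1).filter (fun j => pvG ds j == s)).countP (fun j => decide (j < i)) = 0 := by
    apply List.countP_eq_zero.mpr
    intro j hj
    have := (PySem.List.mem_pyRange_one).mp (List.mem_filter.mp hj).1
    simpa using not_lt.mpr this.1
  rw [h1, h2, Nat.add_zero]

theorem pv_g_of_mem_idx (ds : List String) (s : String) (i : Int) (h : i ∈ pvIdx ds s) :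
    pvG ds i = s := by
  have := (List.mem_filter.mp h).2
  simpa using this

theorem pv_mem_chunk (ds : List String) (s : String) (i : Int) :
    i ∈ pvChunk (s, pvIdx ds s) ↔ i ∈ pvIdx ds s ∧ pvCond ds i = true := by
  cases hp : pvPaired.get? s with
  | none =>
    rw [pvChunk]
    simp only [hp]
    constructor
    · intro h
      refine ⟨h, ?_⟩
      rw [pvCond, pv_g_of_mem_idx ds s i h, hp]
    · exact fun h => h.1
  | some p =>
    rw [pvChunk]
    simp only [hp]
    have hlen : PySem.List.len (pvIdx ds s) = (ds.count s : Int) := by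
      rw [PySem.List.len_eq, pv_idx_length]
    rw [hlen]
    have hcap : (1 : Int) ≤ pvCap ds s p := le_max_left _ _
    rw [show max 1 (PySem.Int.floordiv ((ds.count s : Int)) p) = pvCap ds s p from rfl]
    rw [PySem.List.slice_to _ (by omega)]
    rw [pv_mem_take_of_pairwise_lt _ (pv_idx_pairwise ds s)]
    constructor
    · rintro ⟨hidx, hcnt⟩
      refine ⟨hidx, ?_⟩
      have hgi := pv_g_of_mem_idx ds s i hidx
      have hmem := (PySem.List.mem_pyRange_one).mp (List.mem_filter.mp hidx).1
      rw [pv_idx_countP_lt ds s i (by omega) (by omega)] at hcnt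
      rw [pvCond, hgi, hp]
      simp only [decide_eq_true_eq]
      omega
    · rintro ⟨hidx, hcond⟩
      refine ⟨hidx, ?_⟩
      have hgi := pv_g_of_mem_idx ds s i hidx
      have hmem := (PySem.List.mem_pyRange_one).mp (List.mem_filter.mp hidx).1
      rw [pvCond, hgi, hp] at hcond
      simp only [decide_eq_true_eq] at hcond
      rw [pv_idx_countP_lt ds s i (by omega) (by omega)]
      omega

theorem pv_mem_keep (ds : List String) (i : Int) :
    i ∈ pvKeep ds ↔ i ∈ (PySem.List.pyRange 0 (ds.length : Int) 1).filter (pvCond ds) := by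
  rw [List.mem_filter, pvKeep, pv_mem_foldl_update]
  constructor
  · rintro (h | ⟨sp, hsp, hi⟩)
    · simp [PySem.Set.empty] at h
    · rcases List.mem_map.mp hsp with ⟨s, _, rfl⟩
      rcases (pv_mem_chunk ds s i).mp hi with ⟨hidx, hcond⟩
      exact ⟨(List.mem_filter.mp hidx).1, hcond⟩
  · rintro ⟨hr, hcond⟩
    have hmem := (PySem.List.mem_pyRange_one).mp hr
    right
    refine ⟨(pvG ds i, pvIdx ds (pvG ds i)), ?_, ?_⟩
    · apply List.mem_map_of_mem
      apply (PySem.Set.mem_ofList _ _).mpr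
      apply PySem.List.pyGetD_mem
      simp [PySem.Raise.InRange]
      omega
    · apply (pv_mem_chunk ds (pvG ds i) i).mpr
      refine ⟨List.mem_filter.mpr ⟨hr, by simp⟩, hcond⟩

theorem pv_keep_nodup (ds : List String) : (pvKeep ds).Nodup := by
  apply pv_nodup_foldl_update
  simp [PySem.Set.empty]

theorem pv_sorted_keep (ds : List String) :
    PySem.List.sorted (pvKeep ds) (fun i => i) false
      = (PySem.List.pyRange 0 (ds.length : Int) 1).filter (pvCond ds) := by
  apply PySem.List.sorted_eq_of_perm_of_pairwise_lt
  · apply (List.perm_ext_iff_of_nodup ?_ (pv_keep_nodup ds)).mpr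
    · intro a
      exact (pv_mem_keep ds a).symm
    · exact (PySem.List.nodup_pyRange_one 0 (ds.length : Int)).filter _
  · exact ((PySem.List.pairwise_lt_pyRange_one 0 (ds.length : Int)).filter _).imp (fun h => h)

theorem pv_B_char (ds : List String) :
    deduplicate_donors_alt ds
      = ((PySem.List.pyRange 0 (ds.length : Int) 1).filter (pvCond ds)).map (pvG ds) := by
  have hstep : (fun (K : PySem.Set Int) (sp : String × List Int) =>
      match pvPaired.get? sp.1 with
      | some p => PySem.Set.update K
          (PySem.List.slice sp.2 none (some (max 1 (PySem.Int.floordiv (PySem.List.len sp.2) p))))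
      | none => PySem.Set.update K sp.2)
      = fun K sp => PySem.Set.update K (pvChunk sp) := by
    funext K sp
    rw [pvChunk]
    cases pvPaired.get? sp.1 <;> rfl
  rw [deduplicate_donors_alt]
  rw [pv_idx_items, hstep]
  rw [show ((PySem.Set.ofList ds).map (fun s => (s, pvIdx ds s))).foldl
      (fun K sp => PySem.Set.update K (pvChunk sp)) PySem.Set.empty = pvKeep ds from rfl]
  rw [pv_sorted_keep]
  rfl

-- ===== VERDICT (by name: the statement is the Claim_ definition above) =====
theorem deduplicate_donors_spec : Claim_equal_deduplicate_donors := by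
  intro ds _
  unfold Spec_deduplicate_donors
  rw [pv_A_char, pv_B_char]
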